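-- pv_equiv track=rewrite | github.com/HilaryHe1012/LecInfo | can_split.py | recover_solution
-- ===== SOURCE A (Python) =====
-- def recover_solution(s, sp, d):
--     words = []
--     i = len(s)
--     while i != 0:
--         words.append(s[d[i-1]:i])
--         i = d[i-1]
--     words.reverse()
--     return words
-- ===== SOURCE B (Python) =====
-- def recover_solution(s, sp, d):
--     # Mark the word boundaries in a boolean array, then emit words in one
--     # forward character scan with an accumulator (no slicing, no reverse).
--     n = len(s)
--     cut = [False] * (n + 1)
--     cut[n] = True
--     i = n
--     while i != 0:
--         i = d[i - 1]
--         cut[i] = True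
--     words = []
--     buf = []
--     for k, ch in enumerate(s):
--         buf.append(ch)
--         if cut[k + 1]:
--             words.append(''.join(buf))
--             buf = []
--     return words
-- ===== Notes on version B (the rewrite author's own statement) =====
-- stated objective: alternative
-- what changed: B replaces A's backward slice-and-reverse loop with a boolean boundary array: it marks cut positions along the back-pointer chain, then emits the words in one forward character scan with an accumulator, so no string slicing and no list reversal happen.
-- outside the precondition, e.g. on recover_solution('ab', None, [1, 0]): A returns ['ab'], B returns ['ab']; on recover_solution('ab', None, [0, -1]): A returns ['a', 'b'], B returns ['ab']; on recover_solution('a', None, [-1]): A raises IndexError, B raises IndexError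
import Mathlib
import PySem

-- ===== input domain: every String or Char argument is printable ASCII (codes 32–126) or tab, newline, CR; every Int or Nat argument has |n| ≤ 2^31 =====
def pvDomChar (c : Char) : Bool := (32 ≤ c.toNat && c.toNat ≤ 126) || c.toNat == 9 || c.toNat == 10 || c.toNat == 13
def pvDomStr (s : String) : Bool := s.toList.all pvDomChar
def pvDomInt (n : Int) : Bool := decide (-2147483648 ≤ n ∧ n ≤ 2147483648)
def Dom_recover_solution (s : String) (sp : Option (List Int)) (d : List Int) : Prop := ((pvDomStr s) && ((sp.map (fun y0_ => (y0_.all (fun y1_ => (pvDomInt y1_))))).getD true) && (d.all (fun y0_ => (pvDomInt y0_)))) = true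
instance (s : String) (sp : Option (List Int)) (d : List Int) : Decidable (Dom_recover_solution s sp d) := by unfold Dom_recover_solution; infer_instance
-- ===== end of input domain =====

-- B replaces A's backward slice-and-reverse loop by a boolean boundary array plus one forward
-- character scan with an accumulator; objective: alternative algorithm/data structure, same cost.

-- ===== PORT A =====
-- A's while-loop: i walks the back-pointer chain, appending slices; fuel (= 2*len s + 2)
-- makes the loop total — inside Pre_ the chain strictly decreases, so fuel is never exhausted.
def rsLoopA (s : String) (d : List Int) : Nat → Int → List String → List String
  | 0, _, words => words
  | fuel + 1, i, words =>
    if i = 0 then words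
    else
      let v := PySem.List.pyGetD d (i - 1) 0   -- d[i-1]; in range under Pre_
      rsLoopA s d fuel v (words ++ [PySem.Str.slice s (some v) (some i)])

def recover_solution (s : String) (sp : Option (List Int)) (d : List Int) : List String :=
  (rsLoopA s d (2 * (PySem.Str.len s).toNat + 2) (PySem.Str.len s) []).reverse

-- ===== PORT B =====
-- B's while-loop: walk the chain marking cut[i] = True (same fuel guard as A's loop).
def rsMark (d : List Int) : Nat → Int → List Bool → List Bool
  | 0, _, cut => cut
  | fuel + 1, i, cut =>
    if i = 0 then cut
    else
      let v := PySem.List.pyGetD d (i - 1) 0   -- i = d[i-1]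
      rsMark d fuel v (PySem.List.pySetD cut v true)   -- cut[i] = True

-- B's for-loop body: append ch to buf; if cut[k+1], emit ''.join(buf) and reset buf.
def rsStep (cut : List Bool) (st : List String × List Char) (kc : Int × Char) : List String × List Char :=
  let buf := st.2 ++ [kc.2]
  if PySem.List.pyGetD cut (kc.1 + 1) false = true then (st.1 ++ [String.ofList buf], [])
  else (st.1, buf)

def recover_solution_alt (s : String) (sp : Option (List Int)) (d : List Int) : List String :=
  let n := (PySem.Str.len s).toNat
  let cut0 := PySem.List.pySetD (List.replicate (n + 1) false) (PySem.Str.len s) true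
  let cut := rsMark d (2 * n + 2) (PySem.Str.len s) cut0
  ((PySem.List.enumerate s.toList 0).foldl (rsStep cut) ([], [])).1

-- ===== PRECONDITION & SPEC =====
-- Pre_ is the well-formed back-pointer domain: d has at least one entry per character and each
-- of the first len(s) entries points to 0 <= d[j] <= j (only those are ever read). Outside it A
-- may raise IndexError or loop forever; it also excludes inputs with malformed entries (negative
-- or > index) on which A happens to terminate — there A returns accidental negative-index slices
-- (or the same value, when the bad entries are unreachable) that B's boundary marking does not
-- reproduce; termination of A's chain cannot be stated in closed form without re-simulating it.
def Pre_recover_solution (s : String) (sp : Option (List Int)) (d : List Int) : Prop :=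
  PySem.Str.len s ≤ (d.length : Int) ∧
    ∀ j ∈ List.range (PySem.Str.len s).toNat, 0 ≤ d.getD j 0 ∧ d.getD j 0 ≤ (j : Int)
instance (s : String) (sp : Option (List Int)) (d : List Int) : Decidable (Pre_recover_solution s sp d) := by unfold Pre_recover_solution; infer_instance

def pvWitness_recover_solution : String × Option (List Int) × List Int := ("ab", none, [0, 1])

def Spec_recover_solution (s : String) (sp : Option (List Int)) (d : List Int) (out : List String) : Prop := out = recover_solution_alt s sp d
instance (s : String) (sp : Option (List Int)) (d : List Int) (out : List String) : Decidable (Spec_recover_solution s sp d out) := by unfold Spec_recover_solution; infer_instance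

-- ===== CLAIM (what is proved, stated in full; the proofs are below) =====
def Claim_equal_recover_solution : Prop := ∀ (s : String) (sp : Option (List Int)) (d : List Int), Dom_recover_solution s sp d → Pre_recover_solution s sp d → Spec_recover_solution s sp d (recover_solution s sp d)

-- ===== LEMMAS AND PROOFS =====

-- Proof-only helpers: the cut-position chain as a list, and pairwise slicing of a boundary list.
def rsCuts (d : List Int) : Nat → Int → List Int
  | 0, c => [c]
  | fuel + 1, c =>
    if c = 0 then [c]
    else c :: rsCuts d fuel (PySem.List.pyGetD d (c - 1) 0)

def rsPairs (s : String) : List Int → List String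
  | a :: b :: rest => PySem.Str.slice s (some a) (some b) :: rsPairs s (b :: rest)
  | _ => []

theorem rsLoopA_append (s : String) (d : List Int) :
    ∀ fuel i words, rsLoopA s d fuel i words = words ++ rsLoopA s d fuel i [] := by
  intro fuel
  induction fuel with
  | zero => intro i words; simp [rsLoopA]
  | succ n ih =>
    intro i words
    by_cases h : i = 0
    · simp [rsLoopA, h]
    · simp only [rsLoopA, if_neg h]
      rw [ih _ (words ++ _), ih _ ([] ++ _)]
      simp

theorem rsCuts_head (d : List Int) (fuel : Nat) (c : Int) :
    ∃ t, rsCuts d fuel c = c :: t := by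
  cases fuel with
  | zero => exact ⟨[], rfl⟩
  | succ n =>
    by_cases h : c = 0
    · exact ⟨[], by simp [rsCuts, h]⟩
    · exact ⟨rsCuts d n (PySem.List.pyGetD d (c - 1) 0), by simp [rsCuts, h]⟩

theorem rsPairs_append_last (s : String) :
    ∀ (xs : List Int), xs ≠ [] → ∀ y,
      rsPairs s (xs ++ [y]) = rsPairs s xs ++ [PySem.Str.slice s (some (xs.getLastD 0)) (some y)] := by
  intro xs
  induction xs with
  | nil => intro h; exact absurd rfl h
  | cons a t ih =>
    intro _ y
    cases t with
    | nil => simp [rsPairs]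
    | cons b r =>
      have := ih (by simp) y
      simp only [List.cons_append, rsPairs] at this ⊢
      rw [this]
      simp

-- A-side invariant: along the chain, A's reversed word list equals the pair-slicing of the
-- reversed cut list, for well-formed pointers and enough fuel.
theorem rs_main (s : String) (d : List Int) (m : Nat) (hm : m ≤ d.length)
    (hwf : ∀ j ∈ List.range m, 0 ≤ d.getD j 0 ∧ d.getD j 0 ≤ (j : Int)) :
    ∀ (fuel : Nat) (i : Int), 0 ≤ i → i ≤ (m : Int) → i ≤ (fuel : Int) →
      (rsLoopA s d fuel i []).reverse = rsPairs s ((rsCuts d fuel i).reverse) := by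
  intro fuel
  induction fuel with
  | zero =>
    intro i h0 _ hf
    have hi : i = 0 := le_antisymm (by exact_mod_cast hf) h0
    subst hi
    simp [rsLoopA, rsCuts, rsPairs]
  | succ n ih =>
    intro i h0 hlen hf
    by_cases h : i = 0
    · subst h; simp [rsLoopA, rsCuts, rsPairs]
    · have h1 : (1 : Int) ≤ i := by omega
      have hj : (i - 1).toNat < m := by omega
      have hjd : (i - 1).toNat < d.length := lt_of_lt_of_le hj hm
      have hv : PySem.List.pyGetD d (i - 1) 0 = d.getD (i - 1).toNat 0 := by
        rw [PySem.List.pyGetD_eq_getElem d 0 (by omega : (0:Int) ≤ i - 1) (by omega)]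
        exact (List.getD_eq_getElem d 0 hjd).symm
      have hb := hwf (i - 1).toNat (List.mem_range.mpr hj)
      have hv0 : 0 ≤ PySem.List.pyGetD d (i - 1) 0 := by rw [hv]; exact hb.1
      have hvlt : PySem.List.pyGetD d (i - 1) 0 ≤ i - 1 := by
        rw [hv]
        have := hb.2
        omega
      simp only [rsLoopA, rsCuts, if_neg h]
      rw [rsLoopA_append]
      simp only [List.nil_append, List.reverse_append, List.reverse_cons,
        List.reverse_nil]
      rw [ih _ hv0 (by omega) (by omega)]
      obtain ⟨t, ht⟩ := rsCuts_head d n (PySem.List.pyGetD d (i - 1) 0)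
      have hne : (rsCuts d n (PySem.List.pyGetD d (i - 1) 0)).reverse ≠ [] := by simp [ht]
      rw [rsPairs_append_last s _ hne i]
      have hlast : ((rsCuts d n (PySem.List.pyGetD d (i - 1) 0)).reverse).getLastD 0
          = PySem.List.pyGetD d (i - 1) 0 := by
        rw [ht]; simp
      rw [hlast]

-- Chain properties under well-formed back-pointers: members bounded, strictly decreasing, ends at 0.
theorem rsCuts_spec (d : List Int) (m : Nat) (hm : m ≤ d.length)
    (hwf : ∀ j ∈ List.range m, 0 ≤ d.getD j 0 ∧ d.getD j 0 ≤ (j : Int)) :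
    ∀ (fuel : Nat) (i : Int), 0 ≤ i → i ≤ (m : Int) → i ≤ (fuel : Int) →
      (∀ x ∈ rsCuts d fuel i, 0 ≤ x ∧ x ≤ i) ∧ (rsCuts d fuel i).Pairwise (· > ·) ∧
        (rsCuts d fuel i).getLast? = some 0 := by
  intro fuel
  induction fuel with
  | zero =>
    intro i h0 _ hf
    have hi : i = 0 := le_antisymm (by exact_mod_cast hf) h0
    subst hi
    refine ⟨by simp [rsCuts], by simp [rsCuts], by simp [rsCuts]⟩
  | succ n ih =>
    intro i h0 hlen hf
    by_cases h : i = 0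
    · subst h
      refine ⟨by simp [rsCuts], by simp [rsCuts], by simp [rsCuts]⟩
    · have h1 : (1 : Int) ≤ i := by omega
      have hj : (i - 1).toNat < m := by omega
      have hjd : (i - 1).toNat < d.length := lt_of_lt_of_le hj hm
      have hv : PySem.List.pyGetD d (i - 1) 0 = d.getD (i - 1).toNat 0 := by
        rw [PySem.List.pyGetD_eq_getElem d 0 (by omega : (0:Int) ≤ i - 1) (by omega)]
        exact (List.getD_eq_getElem d 0 hjd).symm
      have hb := hwf (i - 1).toNat (List.mem_range.mpr hj)
      have hv0 : 0 ≤ PySem.List.pyGetD d (i - 1) 0 := by rw [hv]; exact hb.1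
      have hvlt : PySem.List.pyGetD d (i - 1) 0 ≤ i - 1 := by
        rw [hv]
        have := hb.2
        omega
      obtain ⟨ihm, ihpw, ihl⟩ := ih (PySem.List.pyGetD d (i - 1) 0) hv0 (by omega) (by omega)
      obtain ⟨t, ht⟩ := rsCuts_head d n (PySem.List.pyGetD d (i - 1) 0)
      refine ⟨?_, ?_, ?_⟩
      · intro x hx
        simp only [rsCuts, if_neg h, List.mem_cons] at hx
        rcases hx with rfl | hx
        · exact ⟨h0, le_refl _⟩
        · have := ihm x hx
          omega
      · simp only [rsCuts, if_neg h]
        rw [List.pairwise_cons]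
        exact ⟨fun x hx => by have := ihm x hx; omega, ihpw⟩
      · simp only [rsCuts, if_neg h]
        rw [ht, List.getLast?_cons_cons, ← ht]
        exact ihl

-- B's marking loop is the fold of "set true" over the tail of the chain list.
theorem rsMark_eq_foldl (d : List Int) :
    ∀ (fuel : Nat) (i : Int) (cut : List Bool),
      rsMark d fuel i cut = (rsCuts d fuel i).tail.foldl (fun c p => PySem.List.pySetD c p true) cut := by
  intro fuel
  induction fuel with
  | zero => intro i cut; simp [rsMark, rsCuts]
  | succ n ih =>
    intro i cut
    by_cases h : i = 0
    · simp [rsMark, rsCuts, h]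
    · simp only [rsMark, rsCuts, if_neg h, List.tail_cons]
      rw [ih]
      obtain ⟨t, ht⟩ := rsCuts_head d n (PySem.List.pyGetD d (i - 1) 0)
      rw [ht]
      simp

theorem getD_set_bool (c : List Bool) (t k : Nat) (hk : k < c.length) :
    (c.set t true).getD k false = (c.getD k false || t == k) := by
  simp only [List.getD_eq_getElem?_getD, List.getElem?_set]
  by_cases h : t = k
  · subst h
    simp [hk]
  · simp [h]

theorem getD_foldl_pySetD (ps : List Int) :
    ∀ (c0 : List Bool) (k : Nat), k < c0.length → (∀ p ∈ ps, 0 ≤ p) →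
      (ps.foldl (fun c p => PySem.List.pySetD c p true) c0).getD k false =
        (c0.getD k false || ps.any (fun p => p == (k : Int))) := by
  induction ps with
  | nil => intro c0 k _ _; simp
  | cons p ps ih =>
    intro c0 k hk hpos
    have hp0 : 0 ≤ p := hpos p (by simp)
    simp only [List.foldl_cons]
    rw [PySem.List.pySetD_of_nonneg c0 true hp0]
    rw [ih (c0.set p.toNat true) k (by simpa using hk) (fun q hq => hpos q (by simp [hq]))]
    rw [getD_set_bool c0 p.toNat k hk]
    have hbeq : (p == (k : Int)) = (p.toNat == k) := by
      by_cases he : p = (k : Int)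
      · subst he; simp
      · have : ¬ p.toNat = k := by omega
        simp [he, this]
    simp [List.any_cons, hbeq, Bool.or_assoc, Bool.or_comm, Bool.or_left_comm]

-- One word segment: characters at positions p..p+|cs|-1, no cut strictly inside, a cut at the end.
theorem scan_seg (cut : List Bool) :
    ∀ (cs : List Char), cs ≠ [] → ∀ (p : Nat) (ws : List String) (buf : List Char),
      (∀ j : Nat, p < j → j < p + cs.length → cut.getD j false = false) →
      cut.getD (p + cs.length) false = true →
      (PySem.List.enumerate cs (p : Int)).foldl (rsStep cut) (ws, buf) =
        (ws ++ [String.ofList (buf ++ cs)], []) := by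
  intro cs
  induction cs with
  | nil => intro h; exact absurd rfl h
  | cons c cs' ih =>
    intro _ p ws buf hmid hlast
    have e1 : ((p : Int) + 1) = ((p + 1 : Nat) : Int) := by push_cast; ring
    rw [PySem.List.enumerate_cons, List.foldl_cons]
    by_cases hcs' : cs' = []
    · subst hcs'
      have hc : cut.getD (p + 1) false = true := by simpa using hlast
      have hg : PySem.List.pyGetD cut ((p : Int) + 1) false = cut.getD (p + 1) false := by
        rw [e1, PySem.List.pyGetD_natCast]
      rw [List.getD_eq_getElem?_getD] at hc
      simp [rsStep, hg, hc, PySem.List.enumerate_nil, List.getD_eq_getElem?_getD]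
    · have hlen1 : 0 < cs'.length := List.length_pos_iff.mpr hcs'
      have hc : cut.getD (p + 1) false = false := by
        refine hmid (p + 1) (by omega) ?_
        simp only [List.length_cons]
        omega
      have hg : PySem.List.pyGetD cut ((p : Int) + 1) false = cut.getD (p + 1) false := by
        rw [e1, PySem.List.pyGetD_natCast]
      have hstep : rsStep cut (ws, buf) ((p : Int), c) = (ws, buf ++ [c]) := by
        rw [List.getD_eq_getElem?_getD] at hc
        simp [rsStep, hg, hc, List.getD_eq_getElem?_getD]
      rw [hstep]
      have hres := ih hcs' (p + 1) ws (buf ++ [c])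
        (fun j hj1 hj2 => hmid j (by omega) (by simp only [List.length_cons]; omega))
        (by
          have he : (p + 1) + cs'.length = p + (c :: cs').length := by
            simp only [List.length_cons]; omega
          rw [he]; exact hlast)
      rw [e1, hres]
      simp

-- Whole scan: boundaries a < b1 < … < n split the suffix starting at a into the sliced words.
theorem scan_bounds (cut : List Bool) (s : String) :
    ∀ (bs : List Int) (a : Nat) (ws : List String),
      ((a : Int) :: bs).Pairwise (· < ·) →
      (∀ x ∈ bs, x ≤ (s.toList.length : Int)) →
      (bs ≠ [] → bs.getLast? = some (s.toList.length : Int)) →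
      (bs = [] → a = s.toList.length) →
      a ≤ s.toList.length →
      (∀ j : Nat, a < j → j ≤ s.toList.length → cut.getD j false = decide ((j : Int) ∈ bs)) →
      (PySem.List.enumerate (s.toList.drop a) (a : Int)).foldl (rsStep cut) (ws, []) =
        (ws ++ rsPairs s ((a : Int) :: bs), []) := by
  intro bs
  induction bs with
  | nil =>
    intro a ws _ _ _ h4 _ _
    have ha : a = s.toList.length := h4 rfl
    have hd : s.toList.drop a = [] := List.drop_eq_nil_iff.mpr (by omega)
    simp [hd, PySem.List.enumerate_nil, rsPairs]
  | cons b rest ih =>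
    intro a ws hpw hmem hlast hnil hale hcut
    have hpw1 := List.pairwise_cons.mp hpw
    have hab : (a : Int) < b := hpw1.1 b (by simp)
    have hpw2 := List.pairwise_cons.mp hpw1.2
    have hbrest : ∀ x ∈ rest, b < x := hpw2.1
    have hbn : b ≤ (s.toList.length : Int) := hmem b (by simp)
    have hb0 : (0 : Int) ≤ b := by omega
    have hbb : (b.toNat : Int) = b := Int.toNat_of_nonneg hb0
    have habn : a < b.toNat := by omega
    have hbnn : b.toNat ≤ s.toList.length := by omega
    set seg := (s.toList.drop a).take (b.toNat - a) with hseg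
    have hseglen : seg.length = b.toNat - a := by
      rw [hseg, List.length_take, List.length_drop]
      omega
    have hsplit : s.toList.drop a = seg ++ s.toList.drop b.toNat := by
      conv_lhs => rw [← List.take_append_drop (b.toNat - a) (s.toList.drop a)]
      rw [List.drop_drop]
      congr 2
      omega
    rw [hsplit, PySem.List.enumerate_append, List.foldl_append]
    have hsegne : seg ≠ [] := by
      apply List.ne_nil_of_length_pos
      rw [hseglen]
      omega
    rw [scan_seg cut seg hsegne a ws []
      (fun j hj1 hj2 => by
        rw [hseglen] at hj2
        have hj3 : (j : Int) < b := by omega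
        have hj4 : j ≤ s.toList.length := by omega
        rw [hcut j hj1 hj4]
        simp only [decide_eq_false_iff_not, List.mem_cons]
        rintro (he | hr)
        · omega
        · have := hbrest _ hr
          omega)
      (by
        rw [hseglen]
        have he : a + (b.toNat - a) = b.toNat := by omega
        rw [he, hcut b.toNat habn hbnn]
        simp [hbb])]
    have hcast : ((a : Int) + (seg.length : Int)) = (b.toNat : Int) := by
      rw [hseglen]; omega
    rw [hcast]
    rw [ih b.toNat (ws ++ [String.ofList ([] ++ seg)])
      (by rw [hbb]; exact hpw1.2)
      (fun x hx => hmem x (by simp [hx]))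
      (fun hr => by
        have := hlast (by simp)
        cases rest with
        | nil => exact absurd rfl hr
        | cons r rr => rw [List.getLast?_cons_cons] at this; exact this)
      (fun hr => by
        subst hr
        have := hlast (by simp)
        rw [List.getLast?_singleton, Option.some_inj] at this
        omega)
      hbnn
      (fun j hj1 hj2 => by
        have hja : a < j := by omega
        rw [hcut j hja hj2]
        have hjb : (j : Int) ≠ b := by omega
        simp [List.mem_cons, hjb])]
    have hslice : String.ofList ([] ++ seg) = PySem.Str.slice s (some (a : Int)) (some b) := by
      have ht : (PySem.Str.slice s (some (a : Int)) (some b)).toList = seg := by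
        rw [PySem.Str.toList_slice, PySem.Chars.slice_eq_listSlice, ← hbb,
          PySem.List.slice_natCast]
      rw [← ht]
      exact String.ofList_toList
    rw [hslice]
    have hrp : rsPairs s ((a : Int) :: b :: rest)
        = PySem.Str.slice s (some (a : Int)) (some b) :: rsPairs s (b :: rest) := rfl
    rw [hrp, ← hbb]
    simp

-- ===== VERDICT (by name: the statement is the Claim_ definition above) =====
-- cut characterization: after marking, cut[k] is "k is a chain position", for k ≤ n.
theorem cut_getD (n : Nat) (marks : List Int) (t0 : List Int)
    (ht0 : marks = (n : Int) :: t0) (hmem0 : ∀ p ∈ marks, 0 ≤ p) (k : Nat) (hk : k ≤ n) :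
    (marks.tail.foldl (fun c p => PySem.List.pySetD c p true)
        ((List.replicate (n + 1) false).set n true)).getD k false
      = decide ((k : Int) ∈ marks) := by
  rw [getD_foldl_pySetD marks.tail _ k
    (by simp only [List.length_set, List.length_replicate]; omega)
    (fun p hp => hmem0 p (List.mem_of_mem_tail hp))]
  rw [getD_set_bool _ n k (by simp only [List.length_replicate]; omega)]
  rw [List.getD_replicate false (by omega : k < n + 1)]
  rw [ht0, List.tail_cons]
  by_cases h1 : n = k
  · subst h1
    simp
  · have h1' : ¬ ((k : Int) = (n : Int)) := by omega
    by_cases h2 : (k : Int) ∈ t0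
    · have : t0.any (fun p => p == (k : Int)) = true := by
        simp only [List.any_eq_true, beq_iff_eq]
        exact ⟨(k : Int), h2, rfl⟩
      simp [this, h2]
    · have : t0.any (fun p => p == (k : Int)) = false := by
        simp only [List.any_eq_false, beq_iff_eq]
        intro x hx he
        exact h2 (he ▸ hx)
      simp [this, h1, h1', h2]

-- ===== VERDICT (by name: the statement is the Claim_ definition above) =====
theorem recover_solution_spec : Claim_equal_recover_solution := by
  intro s sp d _ hpre
  obtain ⟨hlen, hwf⟩ := hpre
  unfold Spec_recover_solution
  have hls : PySem.Str.len s = (s.toList.length : Int) := PySem.Str.len_eq s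
  set n := s.toList.length with hn
  have htn : (PySem.Str.len s).toNat = n := by rw [hls]; simp
  have hdlen : n ≤ d.length := by
    rw [hls] at hlen
    exact_mod_cast hlen
  have hwf' : ∀ j ∈ List.range n, 0 ≤ d.getD j 0 ∧ d.getD j 0 ≤ (j : Int) := by
    intro j hj
    exact hwf j (by rwa [htn])
  have hfuel : ((n : Int)) ≤ ((2 * n + 2 : Nat) : Int) := by push_cast; omega
  have hA : recover_solution s sp d = rsPairs s ((rsCuts d (2 * n + 2) (n : Int)).reverse) := by
    unfold recover_solution
    rw [htn, hls]
    exact rs_main s d n hdlen hwf' (2 * n + 2) (n : Int) (by positivity) (le_refl _) hfuel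
  obtain ⟨hmem, hpwm, hlastm⟩ :=
    rsCuts_spec d n hdlen hwf' (2 * n + 2) (n : Int) (by positivity) (le_refl _) hfuel
  obtain ⟨t0, ht0⟩ := rsCuts_head d (2 * n + 2) (n : Int)
  set marks := rsCuts d (2 * n + 2) (n : Int) with hmarks
  have hB : recover_solution_alt s sp d = rsPairs s marks.reverse := by
    unfold recover_solution_alt
    simp only [hls, Int.toNat_natCast]
    rw [PySem.List.pySetD_natCast, rsMark_eq_foldl, ← hmarks]
    set cutF := marks.tail.foldl (fun c p => PySem.List.pySetD c p true)
      ((List.replicate (n + 1) false).set n true) with hcutF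
    have hgetD : ∀ k : Nat, k ≤ n → cutF.getD k false = decide ((k : Int) ∈ marks) :=
      fun k hk => cut_getD n marks t0 ht0 (fun p hp => (hmem p hp).1) k hk
    cases hrev : marks.reverse with
    | nil =>
      exfalso
      have : marks = [] := by simpa using congrArg List.reverse hrev
      rw [ht0] at this
      exact List.cons_ne_nil _ _ this
    | cons z bs =>
      have hz : z = 0 := by
        have h1 : marks.reverse.head? = some 0 := by rw [List.head?_reverse]; exact hlastm
        rw [hrev] at h1
        simpa using h1
      subst hz
      have hsb := scan_bounds cutF s bs 0 []
        (by
          have hp : (marks.reverse).Pairwise (· < ·) := List.pairwise_reverse.mpr hpwm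
          rw [hrev] at hp
          simpa using hp)
        (fun x hx => by
          have : x ∈ marks := List.mem_reverse.mp (by rw [hrev]; exact List.mem_cons_of_mem _ hx)
          exact (hmem x this).2)
        (fun hr => by
          have h2 : marks.reverse.getLast? = some ((n : Nat) : Int) := by
            rw [List.getLast?_reverse, ht0]
            simp
          rw [hrev] at h2
          cases bs with
          | nil => exact absurd rfl hr
          | cons r rr => rwa [List.getLast?_cons_cons] at h2)
        (fun hr => by
          subst hr
          have hm1 : marks = [(0 : Int)] := by simpa using congrArg List.reverse hrev
          rw [ht0] at hm1
          have : ((n : Nat) : Int) = 0 := by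
            have := congrArg (fun l => l.head?) hm1
            simpa using this
          omega)
        (by omega)
        (fun j hj1 hj2 => by
          rw [hgetD j hj2]
          have hiff : ((j : Int) ∈ marks) ↔ ((j : Int) ∈ bs) := by
            rw [← List.mem_reverse, hrev, List.mem_cons]
            constructor
            · rintro (he | hm)
              · exfalso; omega
              · exact hm
            · exact fun hm => Or.inr hm
          simp [hiff])
      simp only [Nat.cast_zero, List.drop_zero] at hsb
      rw [hsb]
      simp
  rw [hA, hB]
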